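-- pv_equiv track=rewrite | github.com/AnushaSingh23/Assignment | utils.py | preprocess_feedback
-- ===== SOURCE A (Python) =====
-- from typing import List
--
-- def preprocess_feedback(feedback: List[str]) -> List[str]:
--     seen = set()
--     cleaned = []
--     for f in feedback:
--         f_clean = f.strip()
--         if f_clean and f_clean not in seen:
--             seen.add(f_clean)
--             cleaned.append(f_clean)
--     return cleaned
-- ===== SOURCE B (Python) =====
-- def preprocess_feedback(feedback):
--     result = []
--     for f in reversed(feedback):
--         s = f.strip()
--         if s:
--             result = [s] + [x for x in result if x != s]
--     return result
-- ===== Notes on version B (the rewrite author's own statement) =====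
-- stated objective: alternative
-- what changed: Builds the answer back-to-front: traverses the list reversed, prepending each non-empty stripped string and purging its later duplicates from the partial result by filtering, so there is no seen-set and no membership branch; first occurrences end up first because later ones are purged.
import Mathlib
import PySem

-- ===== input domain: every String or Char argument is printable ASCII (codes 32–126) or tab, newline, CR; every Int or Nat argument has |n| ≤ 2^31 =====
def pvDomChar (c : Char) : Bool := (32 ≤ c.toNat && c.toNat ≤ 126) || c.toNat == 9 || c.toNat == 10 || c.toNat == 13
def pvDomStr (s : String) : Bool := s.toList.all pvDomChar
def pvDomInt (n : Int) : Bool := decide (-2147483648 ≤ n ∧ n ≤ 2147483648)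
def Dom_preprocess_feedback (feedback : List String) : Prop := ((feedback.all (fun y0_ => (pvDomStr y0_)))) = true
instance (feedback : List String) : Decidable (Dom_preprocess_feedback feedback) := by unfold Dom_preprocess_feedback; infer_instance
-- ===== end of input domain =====

-- B builds the result back-to-front (fold from the right, purging duplicates of each new head by filtering) instead of A's forward loop with a seen-set; same result, different traversal, no speed claim.


-- ===== PORT A =====
def preprocess_feedback (feedback : List String) : List String :=
  (feedback.foldl (fun (st : PySem.Set String × List String) f =>
      let f_clean := PySem.Str.strip f
      if f_clean ≠ "" ∧ PySem.Set.contains st.1 f_clean = false then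
        (PySem.Set.add st.1 f_clean, st.2 ++ [f_clean])
      else st) (PySem.Set.empty, [])).2

-- ===== PORT B =====
-- the 'for f in reversed(feedback)' loop rebuilding 'result' is exactly a foldr over feedback
def preprocess_feedback_alt (feedback : List String) : List String :=
  feedback.foldr (fun f result =>
      let s := PySem.Str.strip f
      if s = "" then result else s :: result.filter (fun x => x ≠ s)) []

-- ===== PRECONDITION & SPEC =====
def Spec_preprocess_feedback (feedback : List String) (out : List String) : Prop := out = preprocess_feedback_alt feedback
instance (feedback : List String) (out : List String) : Decidable (Spec_preprocess_feedback feedback out) := by unfold Spec_preprocess_feedback; infer_instance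

-- ===== CLAIM (what is proved, stated in full; the proofs are below) =====
def Claim_equal_preprocess_feedback : Prop := ∀ (feedback : List String), Dom_preprocess_feedback feedback → Spec_preprocess_feedback feedback (preprocess_feedback feedback)

-- ===== LEMMAS AND PROOFS =====

theorem alt_cons (f : String) (rest : List String) :
    preprocess_feedback_alt (f :: rest) =
      (let s := PySem.Str.strip f
       if s = "" then preprocess_feedback_alt rest
       else s :: (preprocess_feedback_alt rest).filter (fun x => x ≠ s)) := rfl

-- generalized invariant: A's fold from state (acc, acc) appends to acc exactly B's
-- back-to-front result with the elements already in acc filtered out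
theorem pf_inv (fb : List String) (acc : List String) :
    (fb.foldl (fun (st : PySem.Set String × List String) f =>
      let f_clean := PySem.Str.strip f
      if f_clean ≠ "" ∧ PySem.Set.contains st.1 f_clean = false then
        (PySem.Set.add st.1 f_clean, st.2 ++ [f_clean])
      else st) (acc, acc)).2
    = acc ++ (preprocess_feedback_alt fb).filter (fun x => !acc.contains x) := by
  induction fb generalizing acc with
  | nil => simp [preprocess_feedback_alt]
  | cons f rest ih =>
    rw [List.foldl_cons, alt_cons]
    simp only []
    by_cases h1 : PySem.Str.strip f = ""
    · rw [if_neg (by simp [h1]), if_pos h1]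
      exact ih acc
    · rw [if_neg h1]
      by_cases h2 : PySem.Set.contains acc (PySem.Str.strip f) = false
      · have hmem : PySem.Str.strip f ∉ acc := by simpa [PySem.Set.contains] using h2
        rw [if_pos ⟨h1, h2⟩]
        have hadd : PySem.Set.add acc (PySem.Str.strip f) = acc ++ [PySem.Str.strip f] := by
          simp [PySem.Set.add, PySem.Set.contains, hmem]
        simp only [hadd]
        rw [ih (acc ++ [PySem.Str.strip f])]
        rw [List.filter_cons_of_pos (by simpa using hmem), List.append_assoc,
          List.filter_filter, List.singleton_append]
        refine congrArg _ (congrArg _ (List.filter_congr ?_))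
        intro x _
        by_cases hx : x = PySem.Str.strip f <;> simp [hx, hmem]
      · have h2' : PySem.Str.strip f ∈ acc := by
          have : PySem.Set.contains acc (PySem.Str.strip f) = true := by
            revert h2; cases PySem.Set.contains acc (PySem.Str.strip f) <;> simp
          simpa [PySem.Set.contains] using this
        rw [if_neg (fun h => h2 h.2)]
        rw [ih acc]
        rw [List.filter_cons_of_neg (by simpa using h2')]
        congr 1
        rw [List.filter_filter]
        apply List.filter_congr
        intro x _
        by_cases hx : x = PySem.Str.strip f <;> simp [hx, h2']

-- ===== VERDICT (by name: the statement is the Claim_ definition above) =====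
theorem preprocess_feedback_spec : Claim_equal_preprocess_feedback := by
  intro feedback _
  unfold Spec_preprocess_feedback preprocess_feedback
  have := pf_inv feedback []
  simpa [PySem.Set.empty] using this
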